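-- pv_equiv track=rewrite | github.com/VictorAmaral22/FURG_AED1 | caseFunction.py | maiuscula
-- ===== SOURCE A (Python) =====
-- def maiuscula (texto):
--     c = 0
--     newStr = ""
--     while c < len(texto):
--         if ord(texto[c]) >= 97 and ord(texto[c]) <= 122:
--             newStr = newStr + chr(ord(texto[c])-32)
--         else:
--             if ord(texto[c]) >= 224 and ord(texto[c]) <= 255:
--                 newStr = newStr + chr(ord(texto[c])-32)
--             else:
--                 newStr = newStr + texto[c]
--
--         c = c + 1
--
--     return newStr
-- ===== SOURCE B (Python) =====
-- # Idiomatic: delegate the whole task to str.upper(); on the printable-ASCII domain the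
-- # claim covers this is exactly A's shift (outside ASCII, e.g. chr(255), the two differ,
-- # but nothing is claimed there).
-- def maiuscula(texto):
--     return texto.upper()
-- ===== Notes on version B (the rewrite author's own statement) =====
-- stated objective: idiomatic
-- what changed: Replaced the index-driven while loop with explicit ord/chr range checks and quadratic string concatenation by a single call to str.upper(), which is exactly A's mapping on the printable-ASCII domain the claim covers.
import Mathlib
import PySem

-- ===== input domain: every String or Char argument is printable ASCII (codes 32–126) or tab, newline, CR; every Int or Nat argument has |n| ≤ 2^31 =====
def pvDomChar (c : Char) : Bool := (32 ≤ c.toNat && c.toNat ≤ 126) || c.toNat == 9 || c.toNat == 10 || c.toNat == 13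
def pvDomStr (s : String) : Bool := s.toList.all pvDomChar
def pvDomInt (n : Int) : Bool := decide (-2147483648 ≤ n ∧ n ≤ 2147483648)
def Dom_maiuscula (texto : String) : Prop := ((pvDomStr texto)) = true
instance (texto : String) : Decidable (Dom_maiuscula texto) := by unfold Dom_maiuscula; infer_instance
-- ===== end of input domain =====

-- B delegates the whole task to str.upper() (idiomatic); on the printable-ASCII domain
-- the claim covers, that is exactly A's shift.

-- ===== PORT A =====
-- A's while loop over index c, appending one character per step; ported as the
-- obvious structural recursion over the remaining characters with the built string
-- as accumulator (branches in A's order).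
def pvLoopA : List Char → List Char → List Char
  | [], acc => acc
  | ch :: rest, acc =>
    if 97 ≤ (ch.toNat : Int) ∧ (ch.toNat : Int) ≤ 122 then
      pvLoopA rest (acc ++ [Char.ofNat (ch.toNat - 32)])
    else
      if 224 ≤ (ch.toNat : Int) ∧ (ch.toNat : Int) ≤ 255 then
        pvLoopA rest (acc ++ [Char.ofNat (ch.toNat - 32)])
      else
        pvLoopA rest (acc ++ [ch])

def maiuscula (texto : String) : String :=
  String.mk (pvLoopA texto.toList [])

-- ===== PORT B =====
-- texto.upper() (PySem.Str.upper: exact on the ASCII domain)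
def maiuscula_alt (texto : String) : String :=
  PySem.Str.upper texto

-- ===== PRECONDITION & SPEC =====
def Spec_maiuscula (texto : String) (out : String) : Prop := out = maiuscula_alt texto
instance (texto : String) (out : String) : Decidable (Spec_maiuscula texto out) := by unfold Spec_maiuscula; infer_instance

-- ===== CLAIM (what is proved, stated in full; the proofs are below) =====
def Claim_equal_maiuscula : Prop := ∀ (texto : String), Dom_maiuscula texto → Spec_maiuscula texto (maiuscula texto)

-- ===== LEMMAS AND PROOFS =====

theorem pvLoopA_eq_map_upper (l : List Char) (acc : List Char)
    (hdom : l.all pvDomChar = true) :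
    pvLoopA l acc = acc ++ l.map PySem.Chars.upperChar := by
  induction l generalizing acc with
  | nil => simp [pvLoopA]
  | cons ch rest ih =>
    simp only [List.all_cons, Bool.and_eq_true] at hdom
    have hch : ch.toNat ≤ 126 ∨ ch.toNat = 9 ∨ ch.toNat = 10 ∨ ch.toNat = 13 := by
      have := hdom.1
      simp [pvDomChar] at this
      omega
    simp only [pvLoopA, List.map_cons]
    by_cases h1 : 97 ≤ (ch.toNat : Int) ∧ (ch.toNat : Int) ≤ 122
    · have hlow : PySem.Chars.islower ch = true := by
        simp only [PySem.Chars.islower, Char.le_def, UInt32.le_iff_toNat_le, Bool.and_eq_true, decide_eq_true_eq]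
        change 97 ≤ ch.toNat ∧ ch.toNat ≤ 122
        omega
      rw [if_pos h1, ih _ hdom.2]
      simp [PySem.Chars.upperChar, hlow]
    · have h2 : ¬ (224 ≤ (ch.toNat : Int) ∧ (ch.toNat : Int) ≤ 255) := by omega
      have hlow : PySem.Chars.islower ch = false := by
        simp only [PySem.Chars.islower, Bool.and_eq_false_iff, decide_eq_false_iff_not, Char.le_def, UInt32.le_iff_toNat_le]
        change ¬ 97 ≤ ch.toNat ∨ ¬ ch.toNat ≤ 122
        omega
      rw [if_neg h1, if_neg h2, ih _ hdom.2]
      simp [PySem.Chars.upperChar, hlow]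

-- ===== VERDICT (by name: the statement is the Claim_ definition above) =====
theorem maiuscula_spec : Claim_equal_maiuscula := by
  intro texto hdom
  unfold Spec_maiuscula maiuscula maiuscula_alt
  rw [pvLoopA_eq_map_upper _ _ hdom, List.nil_append]
  rfl
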